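-- pv_equiv track=rewrite | github.com/ptrckgl/survival-poker | engine.py | compare_strength_seven
-- ===== SOURCE A (Python) =====
-- HAND1_WIN = 1
--
-- HAND2_WIN = 2
--
-- SPLIT_POT = 4
--
-- def get_pair_val(sorted_hand):
--     """Gets the value of a pair and returns it."""
--     pair_val = 0  # Should never stay 0
--     for x in range(len(sorted_hand) - 1):
--         if sorted_hand[x] == sorted_hand[x + 1]:
--             pair_val = sorted_hand[x]
--
--     return pair_val
--
-- def get_three_val(sorted_hand):
--     """Gets the value of the three of a kind and returns it."""
--     three_val = 0  # Should never stay 0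
--     for x in range(len(sorted_hand) - 2):
--         if sorted_hand[x] == sorted_hand[x + 1] == sorted_hand[x + 2]:
--             three_val = sorted_hand[x]
--     return three_val
--
-- def compare_strength_seven(sorted_hand1, sorted_hand2):
--     """Compare two hands of strength seven - Full House."""
--     three_val1 = get_three_val(sorted_hand1)
--     three_val2 = get_three_val(sorted_hand2)
--
--     if three_val1 > three_val2:
--         return HAND1_WIN
--     elif three_val1 < three_val2:
--         return HAND2_WIN
--
--     # If it gets to here, 3OAK vals are equal, so refer to the remaining pair (no kickers)
--     remaining_cards1 = [x for x in sorted_hand1 if x != three_val1]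
--     remaining_cards2 = [x for x in sorted_hand2 if x != three_val2]
--
--     pair_val1 = get_pair_val(remaining_cards1)
--     pair_val2 = get_pair_val(remaining_cards2)
--
--     if pair_val1 > pair_val2:
--         return HAND1_WIN
--     elif pair_val1 < pair_val2:
--         return HAND2_WIN
--
--     return SPLIT_POT
-- ===== SOURCE B (Python) =====
-- HAND1_WIN = 1
--
-- HAND2_WIN = 2
--
-- SPLIT_POT = 4
--
-- def _runs(xs):
--     """Run-length encode consecutive equal elements: [(value, count), ...]."""
--     runs = []
--     i = 0
--     n = len(xs)
--     while i < n:
--         j = i + 1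
--         while j < n and xs[j] == xs[i]:
--             j += 1
--         runs.append((xs[i], j - i))
--         i = j
--     return runs
--
-- def _last_run_val(runs, k):
--     """Value of the last run of length >= k, or 0 if none."""
--     val = 0
--     for v, c in runs:
--         if c >= k:
--             val = v
--     return val
--
-- def compare_strength_seven(sorted_hand1, sorted_hand2):
--     """Compare two hands of strength seven - Full House."""
--     three_val1 = _last_run_val(_runs(sorted_hand1), 3)
--     three_val2 = _last_run_val(_runs(sorted_hand2), 3)
--     if three_val1 != three_val2:
--         return HAND1_WIN if three_val1 > three_val2 else HAND2_WIN
--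
--     pair_val1 = _last_run_val(_runs([x for x in sorted_hand1 if x != three_val1]), 2)
--     pair_val2 = _last_run_val(_runs([x for x in sorted_hand2 if x != three_val2]), 2)
--     if pair_val1 != pair_val2:
--         return HAND1_WIN if pair_val1 > pair_val2 else HAND2_WIN
--
--     return SPLIT_POT
-- ===== Notes on version B (the rewrite author's own statement) =====
-- stated objective: alternative
-- what changed: Replaces the index-based adjacent-triple/pair scans and the rescan of filtered lists with a run-length encoding of each hand: a single pass groups consecutive equal cards into (value,count) runs and the trips/pair values are read off as the last run with count >= 3 (resp. >= 2).
import Mathlib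
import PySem

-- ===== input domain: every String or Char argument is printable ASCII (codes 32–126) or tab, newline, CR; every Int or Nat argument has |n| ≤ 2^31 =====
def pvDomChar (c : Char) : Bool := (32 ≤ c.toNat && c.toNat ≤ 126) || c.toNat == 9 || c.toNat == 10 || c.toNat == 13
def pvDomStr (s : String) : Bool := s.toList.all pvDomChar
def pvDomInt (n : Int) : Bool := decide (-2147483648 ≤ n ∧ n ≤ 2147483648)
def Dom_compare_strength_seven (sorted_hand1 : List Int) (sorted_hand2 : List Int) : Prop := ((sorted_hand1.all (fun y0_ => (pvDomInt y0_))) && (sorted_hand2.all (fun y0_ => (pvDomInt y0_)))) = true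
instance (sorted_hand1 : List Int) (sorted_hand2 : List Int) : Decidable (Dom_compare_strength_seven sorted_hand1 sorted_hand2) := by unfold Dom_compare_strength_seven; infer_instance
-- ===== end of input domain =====

-- B replaces A's index-based adjacent-triple/pair scans (and rescan of the filtered
-- list) with a run-length encoding of consecutive equal cards; same cost, different
-- traversal (objective: alternative).

-- ===== PORT A =====
-- get_pair_val: for x in range(len(h)-1): if h[x]==h[x+1]: pair_val = h[x]
-- ported as the obvious structural recursion over the same accumulator state
def getPairValGo (acc : Int) : List Int → Int
  | a :: b :: t => getPairValGo (if a = b then a else acc) (b :: t)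
  | _ => acc

-- get_three_val: for x in range(len(h)-2): if h[x]==h[x+1]==h[x+2]: three_val = h[x]
def getThreeValGo (acc : Int) : List Int → Int
  | a :: b :: c :: t => getThreeValGo (if a = b ∧ b = c then a else acc) (b :: c :: t)
  | _ => acc

def compare_strength_seven (sorted_hand1 : List Int) (sorted_hand2 : List Int) : Int :=
  let three_val1 := getThreeValGo 0 sorted_hand1
  let three_val2 := getThreeValGo 0 sorted_hand2
  if three_val1 > three_val2 then 1
  else if three_val1 < three_val2 then 2
  else
    let remaining_cards1 := sorted_hand1.filter (fun x => x ≠ three_val1)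
    let remaining_cards2 := sorted_hand2.filter (fun x => x ≠ three_val2)
    let pair_val1 := getPairValGo 0 remaining_cards1
    let pair_val2 := getPairValGo 0 remaining_cards2
    if pair_val1 > pair_val2 then 1
    else if pair_val1 < pair_val2 then 2
    else 4

-- ===== PORT B =====
-- _runs: outer loop emits one (value, count) run per iteration; the inner while
-- counting equal successors is countLead, advancing i to j is recursing on the
-- remaining suffix
def countLead (a : Int) : List Int → Nat
  | b :: t => if b = a then 1 + countLead a t else 0
  | [] => 0

def runs : List Int → List (Int × Nat)
  | [] => []
  | a :: t => (a, countLead a t + 1) :: runs (t.drop (countLead a t))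
termination_by xs => xs.length
decreasing_by
  simp only [List.length_drop, List.length_cons]
  omega

-- _last_run_val: for v, c in runs: if c >= k: val = v
def lastRunVal (rs : List (Int × Nat)) (k : Nat) : Int :=
  rs.foldl (fun acc vc => if k ≤ vc.2 then vc.1 else acc) 0

def compare_strength_seven_alt (sorted_hand1 : List Int) (sorted_hand2 : List Int) : Int :=
  let three_val1 := lastRunVal (runs sorted_hand1) 3
  let three_val2 := lastRunVal (runs sorted_hand2) 3
  if three_val1 ≠ three_val2 then (if three_val1 > three_val2 then 1 else 2)
  else
    let pair_val1 := lastRunVal (runs (sorted_hand1.filter (fun x => x ≠ three_val1))) 2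
    let pair_val2 := lastRunVal (runs (sorted_hand2.filter (fun x => x ≠ three_val2))) 2
    if pair_val1 ≠ pair_val2 then (if pair_val1 > pair_val2 then 1 else 2)
    else 4

-- ===== PRECONDITION & SPEC =====
def Spec_compare_strength_seven (sorted_hand1 : List Int) (sorted_hand2 : List Int) (out : Int) : Prop := out = compare_strength_seven_alt sorted_hand1 sorted_hand2
instance (sorted_hand1 : List Int) (sorted_hand2 : List Int) (out : Int) : Decidable (Spec_compare_strength_seven sorted_hand1 sorted_hand2 out) := by unfold Spec_compare_strength_seven; infer_instance

-- ===== CLAIM (what is proved, stated in full; the proofs are below) =====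
def Claim_equal_compare_strength_seven : Prop := ∀ (sorted_hand1 : List Int) (sorted_hand2 : List Int), Dom_compare_strength_seven sorted_hand1 sorted_hand2 → Spec_compare_strength_seven sorted_hand1 sorted_hand2 (compare_strength_seven sorted_hand1 sorted_hand2)

-- ===== LEMMAS AND PROOFS =====

-- countLead splits the list into a leading block of a's and a rest not starting with a
theorem countLead_split (a : Int) (t : List Int) :
    t = List.replicate (countLead a t) a ++ t.drop (countLead a t) ∧
    (∀ h, (t.drop (countLead a t)).head? = some h → h ≠ a) := by
  induction t with
  | nil => simp [countLead]
  | cons b t ih =>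
    by_cases hb : b = a
    · subst hb
      simp only [countLead, ite_true]
      refine ⟨?_, ?_⟩
      · simpa [List.replicate_succ, Nat.add_comm] using ih.1
      · intro h hh
        exact ih.2 h (by simpa [Nat.add_comm] using hh)
    · simp [countLead, hb]

-- skipping one head whose successor differs
theorem getPairValGo_skip (acc a : Int) (rest : List Int)
    (hne : ∀ h, rest.head? = some h → h ≠ a) :
    getPairValGo acc (a :: rest) = getPairValGo acc rest := by
  cases rest with
  | nil => simp [getPairValGo]
  | cons r t =>
    have hra : a ≠ r := fun h => (hne r rfl) h.symm
    simp [getPairValGo, hra]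

theorem getThreeValGo_skip (acc a : Int) (rest : List Int)
    (hne : ∀ h, rest.head? = some h → h ≠ a) :
    getThreeValGo acc (a :: rest) = getThreeValGo acc rest := by
  cases rest with
  | nil => simp [getThreeValGo]
  | cons r t =>
    have hra : r ≠ a := hne r rfl
    cases t with
    | nil => simp [getThreeValGo]
    | cons r2 t2 =>
      have : ¬ (a = r ∧ r = r2) := by
        rintro ⟨h1, _⟩; exact hra h1.symm
      simp [getThreeValGo, this]

-- a run of k copies of a collapses to a single conditional update of the accumulator
theorem getPairValGo_run (k : Nat) (a : Int) (rest : List Int)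
    (hne : ∀ h, rest.head? = some h → h ≠ a) :
    ∀ acc, getPairValGo acc (List.replicate k a ++ rest) =
      getPairValGo (if 2 ≤ k then a else acc) rest := by
  induction k with
  | zero => intro acc; simp
  | succ k ih =>
    intro acc
    cases k with
    | zero =>
      simpa using getPairValGo_skip acc a rest hne
    | succ m =>
      have hstep : getPairValGo acc (List.replicate (m + 2) a ++ rest) =
          getPairValGo a (List.replicate (m + 1) a ++ rest) := by
        simp [List.replicate_succ, getPairValGo]
      rw [hstep, ih a]
      simp

theorem getThreeValGo_run (k : Nat) (a : Int) (rest : List Int)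
    (hne : ∀ h, rest.head? = some h → h ≠ a) :
    ∀ acc, getThreeValGo acc (List.replicate k a ++ rest) =
      getThreeValGo (if 3 ≤ k then a else acc) rest := by
  induction k with
  | zero => intro acc; simp
  | succ k ih =>
    intro acc
    match k with
    | 0 => simpa using getThreeValGo_skip acc a rest hne
    | 1 =>
      -- [a, a] ++ rest: no triple at the front
      have h2 : getThreeValGo acc (List.replicate 2 a ++ rest) =
          getThreeValGo acc (a :: rest) := by
        cases rest with
        | nil => simp [getThreeValGo]
        | cons r t =>
          have har : a ≠ r := fun h => (hne r rfl) h.symm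
          simp [List.replicate, getThreeValGo, har]
      rw [h2, getThreeValGo_skip acc a rest hne]
      simp
    | m + 2 =>
      have hstep : getThreeValGo acc (List.replicate (m + 3) a ++ rest) =
          getThreeValGo a (List.replicate (m + 2) a ++ rest) := by
        simp [List.replicate_succ, getThreeValGo]
      rw [hstep, ih a]
      simp

-- main bridge: A's scan over the raw list = B's fold over the run-length encoding
theorem scan_eq_runs_fold (xs : List Int) : ∀ acc : Int,
    getThreeValGo acc xs =
      (runs xs).foldl (fun acc vc => if 3 ≤ vc.2 then vc.1 else acc) acc ∧
    getPairValGo acc xs =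
      (runs xs).foldl (fun acc vc => if 2 ≤ vc.2 then vc.1 else acc) acc := by
  match xs with
  | [] => intro acc; simp [runs, getThreeValGo, getPairValGo]
  | a :: t =>
    intro acc
    have hsplit := countLead_split a t
    set n := countLead a t with hn
    have hx : a :: t = List.replicate (n + 1) a ++ t.drop n := by
      conv_lhs => rw [hsplit.1]
      simp [List.replicate_succ]
    have hlen : (t.drop n).length < (a :: t).length := by
      simp only [List.length_drop, List.length_cons]; omega
    have ih := scan_eq_runs_fold (t.drop n)
    have hruns : runs (a :: t) = (a, n + 1) :: runs (t.drop n) := by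
      rw [runs, ← hn]
    constructor
    · conv_lhs => rw [hx]
      rw [getThreeValGo_run (n + 1) a (t.drop n) hsplit.2, (ih _).1, hruns,
        List.foldl_cons]
    · conv_lhs => rw [hx]
      rw [getPairValGo_run (n + 1) a (t.drop n) hsplit.2, (ih _).2, hruns,
        List.foldl_cons]
termination_by xs.length

theorem three_eq (xs : List Int) : getThreeValGo 0 xs = lastRunVal (runs xs) 3 :=
  (scan_eq_runs_fold xs 0).1

theorem pair_eq (xs : List Int) : getPairValGo 0 xs = lastRunVal (runs xs) 2 :=
  (scan_eq_runs_fold xs 0).2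

-- ===== VERDICT (by name: the statement is the Claim_ definition above) =====
theorem compare_strength_seven_spec : Claim_equal_compare_strength_seven := by
  intro h1 h2 _
  simp only [Spec_compare_strength_seven, compare_strength_seven,
    compare_strength_seven_alt, three_eq, pair_eq]
  split_ifs <;> omega
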